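-- pv_equiv track=rewrite | github.com/hq6/smux | smux.py | digestCommands
-- ===== SOURCE A (Python) =====
-- def digestCommands(commands):
--     r"""
--     Remove comments and empty lines and join #smux commands.
--
--     Lines that start with `#` but not `#smux` are comments.
--     Lines that start with `#smux` and end with `\` are merged with subsequent
--     lines recursively.
--     Lines ending with `\` that are not part of a chain of consecutive lines
--     starting with `#smux` are left untouched.
--
--     Before:
--       # This is a comment.
--
--       #smux shell echo \
--       Hello \
--       smux
--
--       echo Hello \
--       World
--
--     After:
--       #smux shell echo Hello smux
--       echo Hello \
--       World
--
--     Parameters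
--     ----------
--     commands: list(str)
--       A list of raw commands from a call to `create`.
--
--     Returns
--     -------
--     list(str)
--       A list of strings with comments removed and #smux lines joined.
--     """
--     rawCommands = [x for x in commands if x != '' and (
--         x.startswith("#smux ") or not x.startswith("#"))]
--     digestedCommands = []
--     bufferedLine = None
--     for line in rawCommands:
--         # The previous line initiated a continuation.
--         if bufferedLine:
--             bufferedLine += line
--
--             # Check if next line should be joined.
--             if bufferedLine.endswith("\\"):
--                 bufferedLine = bufferedLine[:-1]
--             else:
--                 digestedCommands.append(bufferedLine)
--                 bufferedLine = None
--         # Previous line did not initiate or continue a continuation.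
--         else:
--             if line.startswith("#smux ") and line.endswith("\\"):
--                 bufferedLine = line[:-1]
--             else:
--                 digestedCommands.append(line)
--     # The last line ended in a continuation for some reason.
--     if bufferedLine:
--         digestedCommands.append(bufferedLine)
--     return digestedCommands
-- ===== SOURCE B (Python) =====
-- def digestCommands(commands):
--     lines = [x for x in commands if x != '' and (
--         x.startswith("#smux ") or not x.startswith("#"))]
--     out = []
--     i = 0
--     n = len(lines)
--     while i < n:
--         line = lines[i]
--         i += 1
--         if line.startswith("#smux ") and line.endswith("\\"):
--             joined = line[:-1]
--             closed = False
--             while i < n and not closed: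
--                 nxt = lines[i]
--                 i += 1
--                 if nxt.endswith("\\"):
--                     joined += nxt[:-1]
--                 else:
--                     joined += nxt
--                     closed = True
--             out.append(joined)
--         else:
--             out.append(line)
--     return out
-- ===== Notes on version B (the rewrite author's own statement) =====
-- stated objective: alternative
-- what changed: A threads a nullable bufferedLine flag through one flat state-machine loop; B walks the filtered list with an index and, on a '#smux ...\' opener, runs an inner while loop that consumes and joins the whole continuation chain at once.
import Mathlib
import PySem

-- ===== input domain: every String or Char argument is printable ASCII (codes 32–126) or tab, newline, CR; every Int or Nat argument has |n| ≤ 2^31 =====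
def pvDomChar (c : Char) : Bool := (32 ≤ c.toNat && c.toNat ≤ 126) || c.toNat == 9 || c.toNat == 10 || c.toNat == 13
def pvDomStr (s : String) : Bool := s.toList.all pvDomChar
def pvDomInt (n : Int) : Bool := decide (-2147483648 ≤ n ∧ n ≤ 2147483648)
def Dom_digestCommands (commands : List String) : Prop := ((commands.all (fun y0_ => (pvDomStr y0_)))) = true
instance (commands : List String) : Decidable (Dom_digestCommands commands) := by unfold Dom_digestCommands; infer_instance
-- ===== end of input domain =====

-- B replaces A's buffered-line flag state machine by an outer walk with an inner
-- consume loop that joins a whole continuation chain at once (objective: alternative decomposition).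


-- shared helper: the filter predicate of the common prefilter line
def pvKeep (x : String) : Bool :=
  x != "" && (PySem.Str.startswith x "#smux " || !PySem.Str.startswith x "#")

-- shared helper: s[:-1]
def pvCut (s : String) : String := PySem.Str.slice s none (some (-1))

-- ===== PORT A =====
-- Python truthiness of the bufferedLine variable (None or '' are falsy)
def pvTruthy : Option String → Bool
  | some s => s != ""
  | none => false

-- one iteration of A's for-loop body over the state (digestedCommands, bufferedLine)
def pvStepA (st : List String × Option String) (line : String) : List String × Option String :=
  if pvTruthy st.2 then
    let b := st.2.getD "" ++ line
    if PySem.Str.endswith b "\\" then (st.1, some (pvCut b))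
    else (st.1 ++ [b], none)
  else
    if PySem.Str.startswith line "#smux " && PySem.Str.endswith line "\\" then
      (st.1, some (pvCut line))
    else (st.1 ++ [line], none)

-- the trailing 'if bufferedLine: digestedCommands.append(bufferedLine)'
def pvFinA (st : List String × Option String) : List String :=
  if pvTruthy st.2 then st.1 ++ [st.2.getD ""] else st.1

def digestCommands (commands : List String) : List String :=
  pvFinA ((commands.filter pvKeep).foldl pvStepA ([], none))

-- ===== PORT B =====
-- B's inner while loop: consume the continuation chain, return (joined, remaining lines)
def pvConsume (joined : String) : List String → String × List String
  | [] => (joined, [])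
  | nxt :: rest =>
    if PySem.Str.endswith nxt "\\" then pvConsume (joined ++ pvCut nxt) rest
    else (joined ++ nxt, rest)

theorem pvConsume_len (j : String) (l : List String) : (pvConsume j l).2.length ≤ l.length := by
  induction l generalizing j with
  | nil => simp [pvConsume]
  | cons x rest ih =>
    simp only [pvConsume]
    split
    · exact (ih _).trans (Nat.le_succ _)
    · simp

-- B's outer while loop over the filtered lines
def pvWalk : List String → List String
  | [] => []
  | line :: rest =>
    if PySem.Str.startswith line "#smux " && PySem.Str.endswith line "\\" then
      (pvConsume (pvCut line) rest).1 :: pvWalk (pvConsume (pvCut line) rest).2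
    else line :: pvWalk rest
termination_by l => l.length
decreasing_by
  · exact Nat.lt_succ_of_le (pvConsume_len _ _)
  · simp

def digestCommands_alt (commands : List String) : List String :=
  pvWalk (commands.filter pvKeep)

-- ===== PRECONDITION & SPEC =====
def Spec_digestCommands (commands : List String) (out : List String) : Prop := out = digestCommands_alt commands
instance (commands : List String) (out : List String) : Decidable (Spec_digestCommands commands out) := by unfold Spec_digestCommands; infer_instance

-- ===== CLAIM (what is proved, stated in full; the proofs are below) =====
def Claim_equal_digestCommands : Prop := ∀ (commands : List String), Dom_digestCommands commands → Spec_digestCommands commands (digestCommands commands)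

-- ===== LEMMAS AND PROOFS =====
theorem str_ne_empty_iff (s : String) : s ≠ "" ↔ s.toList ≠ [] := by
  rw [not_iff_not, ← String.toList_inj]; simp

theorem append_ne_empty_left (a b : String) (ha : a ≠ "") : a ++ b ≠ "" := by
  rw [str_ne_empty_iff] at ha ⊢
  simp [ha]

theorem suffix_singleton_iff (c : Char) (l : List Char) : ([c] <:+ l) ↔ l.getLast? = some c := by
  constructor
  · rintro ⟨t, rfl⟩; simp
  · intro h
    cases l using List.reverseRecOn with
    | nil => simp at h
    | append_singleton t a => simp_all

theorem endswith_append (b x : String) (hx : x ≠ "") :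
    PySem.Str.endswith (b ++ x) "\\" = PySem.Str.endswith x "\\" := by
  rw [str_ne_empty_iff] at hx
  rw [Bool.eq_iff_iff]
  have : ("\\" : String).toList = ['\\'] := rfl
  simp [PySem.Chars.endswith_iff, this, suffix_singleton_iff,
    List.getLast?_append_of_ne_nil _ hx]

theorem cut_append (b x : String) (hx : x ≠ "") : pvCut (b ++ x) = b ++ pvCut x := by
  rw [str_ne_empty_iff] at hx
  rw [← String.toList_inj]
  simp [pvCut, PySem.List.slice_to_neg_one, hx]

theorem cut_ne_of_smux (x : String) (hs : PySem.Str.startswith x "#smux " = true) :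
    pvCut x ≠ "" := by
  rw [str_ne_empty_iff]
  have hp : ("#smux " : String).toList <+: x.toList := by
    simpa [PySem.Chars.startswith_iff] using hs
  have h6 : 6 ≤ x.toList.length := by
    have := hp.length_le
    simpa using this
  have : (pvCut x).toList = x.toList.dropLast := PySem.Str.slice_to_neg_one x
  rw [this, ← List.length_pos_iff, List.length_dropLast]
  omega

theorem pvMain (l : List String) :
    (∀ (acc : List String) (b : String), b ≠ "" → (∀ x ∈ l, x ≠ "") →
      pvFinA (l.foldl pvStepA (acc, some b)) =
        acc ++ (pvConsume b l).1 :: pvWalk (pvConsume b l).2) ∧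
    (∀ acc : List String, (∀ x ∈ l, x ≠ "") →
      pvFinA (l.foldl pvStepA (acc, none)) = acc ++ pvWalk l) := by
  induction l with
  | nil =>
    constructor
    · intro acc b hb _
      simp [pvFinA, pvTruthy, pvConsume, pvWalk, hb]
    · intro acc _
      simp [pvFinA, pvTruthy, pvWalk]
  | cons x rest ih =>
    have hxmem : ∀ h : (∀ y ∈ x :: rest, y ≠ ""), x ≠ "" := fun h => h x (by simp)
    constructor
    · intro acc b hb hne
      have hx : x ≠ "" := hxmem hne
      have hrest : ∀ y ∈ rest, y ≠ "" := fun y hy => hne y (by simp [hy])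
      rw [List.foldl_cons]
      have hstep : pvStepA (acc, some b) x =
          (if PySem.Str.endswith x "\\" then (acc, some (b ++ pvCut x))
           else (acc ++ [b ++ x], none)) := by
        simp only [pvStepA, pvTruthy, Option.getD_some]
        rw [if_pos (by simpa using hb), endswith_append b x hx]
        split
        · rw [cut_append b x hx]
        · rfl
      rw [hstep]
      by_cases he : PySem.Str.endswith x "\\" = true
      · rw [if_pos he]
        have he' : PySem.Chars.endswith x.toList ['\\'] = true := by simpa using he
        have hbc : b ++ pvCut x ≠ "" := append_ne_empty_left _ _ hb
        rw [ih.1 acc (b ++ pvCut x) hbc hrest]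
        simp [pvConsume, he']
      · rw [if_neg he]
        have he' : PySem.Chars.endswith x.toList ['\\'] = false := by
          simpa using Bool.not_eq_true _ ▸ he
        rw [ih.2 (acc ++ [b ++ x]) hrest]
        simp [pvConsume, he']
    · intro acc hne
      have hx : x ≠ "" := hxmem hne
      have hrest : ∀ y ∈ rest, y ≠ "" := fun y hy => hne y (by simp [hy])
      rw [List.foldl_cons]
      simp only [pvStepA, pvTruthy, Bool.false_eq_true, if_false]
      by_cases hc : (PySem.Str.startswith x "#smux " && PySem.Str.endswith x "\\") = true
      · rw [if_pos hc]
        have hcut : pvCut x ≠ "" := cut_ne_of_smux x (by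
          cases h1 : PySem.Str.startswith x "#smux " <;> simp_all)
        rw [ih.1 acc (pvCut x) hcut hrest]
        rw [pvWalk, if_pos hc]
      · rw [if_neg hc]
        rw [ih.2 (acc ++ [x]) hrest]
        rw [pvWalk, if_neg hc]
        simp

theorem filter_ne_empty (commands : List String) :
    ∀ x ∈ commands.filter pvKeep, x ≠ "" := by
  intro x hx
  have := (List.mem_filter.mp hx).2
  simp only [pvKeep, Bool.and_eq_true, bne_iff_ne] at this
  exact this.1

-- ===== VERDICT (by name: the statement is the Claim_ definition above) =====
theorem digestCommands_spec : Claim_equal_digestCommands := by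
  intro commands _
  unfold Spec_digestCommands digestCommands digestCommands_alt
  exact (pvMain (commands.filter pvKeep)).2 [] (filter_ne_empty commands)
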